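-- pv_equiv track=rewrite | github.com/ddsnowboard/JavaProjects | AdventOfCode/2023/day1/part2.py | starting_number
-- ===== SOURCE A (Python) =====
-- def starting_number(s):
--     numbers = dict(**{
--         "one": 1,
--         "two": 2,
--         "three": 3,
--         "four": 4,
--         "five": 5,
--         "six": 6,
--         "seven": 7,
--         "eight": 8,
--         "nine": 9
--     }, **{str(n): n for n in range(10)})
--     for prefix, number in numbers.items():
--         if s.startswith(prefix):
--             return number
--     return None
-- ===== SOURCE B (Python) =====
-- INDEX = {
--     "o": (("one", 1),),
--     "t": (("two", 2), ("three", 3)),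
--     "f": (("four", 4), ("five", 5)),
--     "s": (("six", 6), ("seven", 7)),
--     "e": (("eight", 8),),
--     "n": (("nine", 9),),
-- }
--
--
-- def starting_number(s):
--     if not s:
--         return None
--     c = s[0]
--     if "0" <= c <= "9":
--         return ord(c) - 48
--     for word, value in INDEX.get(c, ()):
--         if s.startswith(word):
--             return value
--     return None
-- ===== Notes on version B (the rewrite author's own statement) =====
-- stated objective: alternative
-- what changed: B replaces A's flat scan over all 19 dict prefixes with a first-character dispatch: an empty-string guard, an O(1) range test for a leading digit, and a hash index keyed by the first character that yields only the (at most two) candidate words to test with startswith.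
import Mathlib
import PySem

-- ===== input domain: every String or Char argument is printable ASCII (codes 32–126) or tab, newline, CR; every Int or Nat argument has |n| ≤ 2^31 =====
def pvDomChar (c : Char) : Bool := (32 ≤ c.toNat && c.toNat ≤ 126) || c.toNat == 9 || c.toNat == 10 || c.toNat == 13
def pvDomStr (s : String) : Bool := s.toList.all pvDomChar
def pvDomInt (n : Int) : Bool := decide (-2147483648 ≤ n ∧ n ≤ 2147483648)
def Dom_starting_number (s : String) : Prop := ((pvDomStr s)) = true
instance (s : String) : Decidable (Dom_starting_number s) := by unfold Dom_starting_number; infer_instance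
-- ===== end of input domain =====

-- B replaces A's flat scan over all 19 prefixes with a first-character dispatch (empty guard,
-- digit range test, hash index from the first character to its candidate words); objective: alternative.

-- ===== PORT A =====
-- dict(**words, **{str(n): n for n in range(10)}): keys are distinct, so as an association
-- list in insertion order it is the word pairs followed by the digit pairs.
def pvANumbers : List (String × Int) :=
  [("one", 1), ("two", 2), ("three", 3), ("four", 4), ("five", 5),
   ("six", 6), ("seven", 7), ("eight", 8), ("nine", 9)]
  ++ (PySem.List.pyRange 0 10 1).map (fun n => (PySem.Int.toStr n, n))

-- the for-loop over numbers.items(): first prefix match wins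
def pvALoop (s : String) : List (String × Int) → Option Int
  | [] => none
  | (p, number) :: rest =>
    if PySem.Str.startswith s p then some number else pvALoop s rest

def starting_number (s : String) : Option Int :=
  pvALoop s pvANumbers

-- ===== PORT B =====
-- INDEX: dict from a first character (a 1-char string) to its candidate words
def pvIndex : PySem.Dict String (List (String × Int)) :=
  PySem.Dict.ofList
    [("o", [("one", 1)]),
     ("t", [("two", 2), ("three", 3)]),
     ("f", [("four", 4), ("five", 5)]),
     ("s", [("six", 6), ("seven", 7)]),
     ("e", [("eight", 8)]),
     ("n", [("nine", 9)])]

-- the for-loop over the candidate list INDEX.get(c, ())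
def pvBLoop (s : String) : List (String × Int) → Option Int
  | [] => none
  | (w, v) :: rest =>
    if PySem.Str.startswith s w then some v else pvBLoop s rest

def starting_number_alt (s : String) : Option Int :=
  match s.toList with
  | [] => none                                     -- `if not s: return None`
  | c :: _ =>
    if '0' ≤ c ∧ c ≤ '9' then some ((c.toNat : Int) - 48)   -- "0" <= c <= "9"; ord(c) - 48
    else pvBLoop s (pvIndex.getD (String.ofList [c]) [])

-- ===== PRECONDITION & SPEC =====
def Spec_starting_number (s : String) (out : Option Int) : Prop := out = starting_number_alt s
instance (s : String) (out : Option Int) : Decidable (Spec_starting_number s out) := by unfold Spec_starting_number; infer_instance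

-- ===== CLAIM =====
def Claim_equal_starting_number : Prop := ∀ (s : String), Dom_starting_number s → Spec_starting_number s (starting_number s)

-- ===== LEMMAS AND PROOFS =====

theorem pvANumbers_eq : pvANumbers =
    [("one", 1), ("two", 2), ("three", 3), ("four", 4), ("five", 5),
     ("six", 6), ("seven", 7), ("eight", 8), ("nine", 9),
     ("0", 0), ("1", 1), ("2", 2), ("3", 3), ("4", 4),
     ("5", 5), ("6", 6), ("7", 7), ("8", 8), ("9", 9)] := by rfl

theorem pvIndex_eq : pvIndex = PySem.Dict.mk
    [("o", [("one", 1)]),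
     ("t", [("two", 2), ("three", 3)]),
     ("f", [("four", 4), ("five", 5)]),
     ("s", [("six", 6), ("seven", 7)]),
     ("e", [("eight", 8)]),
     ("n", [("nine", 9)])] := by rfl

theorem pvChar_eq_of_toNat (c : Char) (n : Nat) (h : c.toNat = n) :
    c = Char.ofNat n := by
  subst h
  exact (Char.ofNat_toNat c).symm

-- ===== VERDICT =====
theorem starting_number_spec : Claim_equal_starting_number := by
  intro s _
  unfold Spec_starting_number
  cases hs : s.toList with
  | nil =>
    simp [starting_number, starting_number_alt, pvANumbers_eq, pvALoop, hs,
          PySem.Str.startswith_eq, PySem.Chars.startswith, List.isPrefixOf]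
  | cons c rest =>
    by_cases hd : '0' ≤ c ∧ c ≤ '9'
    · -- leading digit: enumerate the ten digits
      have hn : c.toNat = 48 ∨ c.toNat = 49 ∨ c.toNat = 50 ∨ c.toNat = 51 ∨
          c.toNat = 52 ∨ c.toNat = 53 ∨ c.toNat = 54 ∨ c.toNat = 55 ∨
          c.toNat = 56 ∨ c.toNat = 57 := by
        obtain ⟨h1, h2⟩ := hd
        rw [Char.le_def, UInt32.le_iff_toNat_le] at h1 h2
        have h1' : 48 ≤ c.toNat := h1
        have h2' : c.toNat ≤ 57 := h2
        omega
      rcases hn with h | h | h | h | h | h | h | h | h | h <;>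
        rw [pvChar_eq_of_toNat c _ h] at hs <;>
        simp [starting_number, starting_number_alt, pvANumbers_eq, pvALoop, hs,
              PySem.Str.startswith_eq, PySem.Chars.startswith, List.isPrefixOf]
    · -- no leading digit: derive the ten digit disequalities for A's digit entries
      have h0 : c ≠ '0' := by rintro rfl; exact hd (by decide)
      have h1 : c ≠ '1' := by rintro rfl; exact hd (by decide)
      have h2 : c ≠ '2' := by rintro rfl; exact hd (by decide)
      have h3 : c ≠ '3' := by rintro rfl; exact hd (by decide)
      have h4 : c ≠ '4' := by rintro rfl; exact hd (by decide)
      have h5 : c ≠ '5' := by rintro rfl; exact hd (by decide)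
      have h6 : c ≠ '6' := by rintro rfl; exact hd (by decide)
      have h7 : c ≠ '7' := by rintro rfl; exact hd (by decide)
      have h8 : c ≠ '8' := by rintro rfl; exact hd (by decide)
      have h9 : c ≠ '9' := by rintro rfl; exact hd (by decide)
      by_cases ho : c = 'o'
      · subst ho
        simp [starting_number, starting_number_alt, pvANumbers_eq, pvALoop, pvBLoop,
              pvIndex_eq, hs, PySem.Str.startswith_eq, PySem.Chars.startswith,
              List.isPrefixOf, PySem.Dict.getD_eq_get?_getD, PySem.Dict.get?_mk_cons,
              String.ext_iff]
      by_cases ht : c = 't'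
      · subst ht
        simp [starting_number, starting_number_alt, pvANumbers_eq, pvALoop, pvBLoop,
              pvIndex_eq, hs, PySem.Str.startswith_eq, PySem.Chars.startswith,
              List.isPrefixOf, PySem.Dict.getD_eq_get?_getD, PySem.Dict.get?_mk_cons,
              String.ext_iff]
      by_cases hf : c = 'f'
      · subst hf
        simp [starting_number, starting_number_alt, pvANumbers_eq, pvALoop, pvBLoop,
              pvIndex_eq, hs, PySem.Str.startswith_eq, PySem.Chars.startswith,
              List.isPrefixOf, PySem.Dict.getD_eq_get?_getD, PySem.Dict.get?_mk_cons,
              String.ext_iff]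
      by_cases hss : c = 's'
      · subst hss
        simp [starting_number, starting_number_alt, pvANumbers_eq, pvALoop, pvBLoop,
              pvIndex_eq, hs, PySem.Str.startswith_eq, PySem.Chars.startswith,
              List.isPrefixOf, PySem.Dict.getD_eq_get?_getD, PySem.Dict.get?_mk_cons,
              String.ext_iff]
      by_cases he : c = 'e'
      · subst he
        simp [starting_number, starting_number_alt, pvANumbers_eq, pvALoop, pvBLoop,
              pvIndex_eq, hs, PySem.Str.startswith_eq, PySem.Chars.startswith,
              List.isPrefixOf, PySem.Dict.getD_eq_get?_getD, PySem.Dict.get?_mk_cons,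
              String.ext_iff]
      by_cases hnn : c = 'n'
      · subst hnn
        simp [starting_number, starting_number_alt, pvANumbers_eq, pvALoop, pvBLoop,
              pvIndex_eq, hs, PySem.Str.startswith_eq, PySem.Chars.startswith,
              List.isPrefixOf, PySem.Dict.getD_eq_get?_getD, PySem.Dict.get?_mk_cons,
              String.ext_iff]
      · simp [starting_number, starting_number_alt, pvANumbers_eq, pvALoop, pvBLoop,
              pvIndex_eq, hs, PySem.Str.startswith_eq, PySem.Chars.startswith,
              List.isPrefixOf, PySem.Dict.getD_eq_get?_getD, PySem.Dict.get?_mk_cons,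
              String.ext_iff, PySem.Dict.get?,
              Ne.symm h0, Ne.symm h1, Ne.symm h2, Ne.symm h3, Ne.symm h4,
              Ne.symm h5, Ne.symm h6, Ne.symm h7, Ne.symm h8, Ne.symm h9,
              Ne.symm ho, Ne.symm ht, Ne.symm hf, Ne.symm hss, Ne.symm he, Ne.symm hnn]
        push_neg at hd
        exact hd
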